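-- pv_equiv track=rewrite | github.com/kaestro/algorithms_v3 | Daily Practices/February/Week 5th/덧칠하기 - programmers.py | solution_heap
-- ===== SOURCE A (Python) =====
-- from typing import List
-- import heapq
--
-- def solution_heap(wall_length: int, roller_length: int, section_list: List[int]) -> int:
--     answer = 0
--     section_heap = section_list.copy()
--     heapq.heapify(section_heap)
--
--     while section_heap:
--         min_section = heapq.heappop(section_heap)
--         answer += 1
--         section_heap = [i for i in section_heap if i >= min_section + roller_length]
--         heapq.heapify(section_heap)
--
--     return answer
-- ===== SOURCE B (Python) =====
-- def solution_heap(wall_length, roller_length, section_list):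
--     answer = 0
--     cover_end = None
--     for s in sorted(section_list):
--         if cover_end is None or s >= cover_end:
--             answer += 1
--             cover_end = s + roller_length
--     return answer
-- ===== Notes on version B (the rewrite author's own statement) =====
-- stated objective: faster
-- what changed: replaced the repeated heap-pop-and-rebuild (pop the min, rescan and filter the whole remaining list, re-heapify) by a single sort followed by one linear greedy scan that tracks the current coverage end
import Mathlib
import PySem

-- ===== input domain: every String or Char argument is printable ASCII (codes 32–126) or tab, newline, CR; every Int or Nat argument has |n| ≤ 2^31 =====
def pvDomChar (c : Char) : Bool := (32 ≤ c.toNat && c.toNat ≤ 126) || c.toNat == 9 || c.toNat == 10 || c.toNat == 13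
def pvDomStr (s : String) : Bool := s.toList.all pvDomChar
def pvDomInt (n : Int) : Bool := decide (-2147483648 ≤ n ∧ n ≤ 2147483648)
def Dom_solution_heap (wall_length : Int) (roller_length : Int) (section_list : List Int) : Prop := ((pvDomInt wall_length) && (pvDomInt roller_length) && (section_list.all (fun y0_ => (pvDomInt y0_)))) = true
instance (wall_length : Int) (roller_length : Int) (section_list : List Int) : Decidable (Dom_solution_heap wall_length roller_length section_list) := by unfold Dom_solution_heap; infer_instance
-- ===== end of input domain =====

-- B replaces A's repeated pop-min / filter / re-heapify passes by one sort plus a single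
-- greedy scan tracking the coverage end (objective: faster).

-- ===== PORT A =====
-- The heap is modelled as a plain list: heappop returns the minimum element (removing one
-- occurrence); the list-comprehension filter keeps the survivors.  This is exact for the
-- returned COUNT (the only output): the heap's internal array layout never affects which
-- element heappop returns (the minimum) nor which elements survive the filter.
theorem pv_foldl_min_mem : ∀ (t : List Int) (h : Int), t.foldl min h ∈ h :: t := by
  intro t
  induction t with
  | nil => intro h; simp [List.foldl]
  | cons a t ih =>
    intro h
    rw [List.foldl]
    rcases List.mem_cons.mp (ih (min h a)) with h1 | h1
    · rcases min_choice h a with hc | hc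
      · rw [h1, hc]; exact .head _
      · rw [h1, hc]; exact .tail _ (.head _)
    · exact .tail _ (.tail _ h1)

def solution_heap_go (rl : Int) : List Int → Int → Int
  | [], answer => answer
  | h :: t, answer =>
      solution_heap_go rl
        (((h :: t).erase (t.foldl min h)).filter (fun i => decide (t.foldl min h + rl ≤ i)))
        (answer + 1)
termination_by xs => xs.length
decreasing_by
  simp only [List.foldl_attach]
  calc (((h :: t).erase (t.foldl min h)).filter (fun i => decide (t.foldl min h + rl ≤ i))).length
      ≤ ((h :: t).erase (t.foldl min h)).length := List.length_filter_le _ _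
    _ < (h :: t).length := by
        rw [List.length_erase_of_mem (pv_foldl_min_mem t h)]; simp

def solution_heap (wall_length : Int) (roller_length : Int) (section_list : List Int) : Int :=
  solution_heap_go roller_length section_list 0

-- ===== PORT B =====
def solution_heap_alt (wall_length : Int) (roller_length : Int) (section_list : List Int) : Int :=
  ((PySem.List.sorted section_list (fun x => x) false).foldl
    (fun (st : Int × Option Int) s =>
      match st with
      | (answer, none) => (answer + 1, some (s + roller_length))
      | (answer, some c) =>
          if c ≤ s then (answer + 1, some (s + roller_length)) else (answer, some c))
    (0, none)).1

-- ===== PRECONDITION & SPEC =====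
def Spec_solution_heap (wall_length : Int) (roller_length : Int) (section_list : List Int) (out : Int) : Prop := out = solution_heap_alt wall_length roller_length section_list
instance (wall_length : Int) (roller_length : Int) (section_list : List Int) (out : Int) : Decidable (Spec_solution_heap wall_length roller_length section_list out) := by unfold Spec_solution_heap; infer_instance

-- ===== CLAIM (what is proved, stated in full; the proofs are below) =====
def Claim_equal_solution_heap : Prop := ∀ (wall_length : Int) (roller_length : Int) (section_list : List Int), Dom_solution_heap wall_length roller_length section_list → Spec_solution_heap wall_length roller_length section_list (solution_heap wall_length roller_length section_list)

-- ===== LEMMAS AND PROOFS =====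

theorem pv_go_nil (rl a : Int) : solution_heap_go rl [] a = a := by
  rw [solution_heap_go]

theorem pv_go_cons (rl a h : Int) (t : List Int) :
    solution_heap_go rl (h :: t) a =
      solution_heap_go rl
        (((h :: t).erase (t.foldl min h)).filter (fun i => decide (t.foldl min h + rl ≤ i)))
        (a + 1) := by
  rw [solution_heap_go]

-- recursive form of B's greedy scan (proof vehicle)
def gLoop (rl : Int) : Option Int → List Int → Int
  | _, [] => 0
  | none, s :: t => 1 + gLoop rl (some (s + rl)) t
  | some c, s :: t =>
      if c ≤ s then 1 + gLoop rl (some (s + rl)) t else gLoop rl (some c) t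

theorem pv_foldl_min_le : ∀ (t : List Int) (h : Int), ∀ y ∈ h :: t, t.foldl min h ≤ y := by
  intro t
  induction t with
  | nil => intro h y hy; rw [List.mem_singleton] at hy; simp [List.foldl, hy]
  | cons a t ih =>
    intro h y hy
    rw [List.foldl]
    rcases List.mem_cons.mp hy with rfl | hy'
    · exact le_trans (ih (min y a) _ (.head _)) (min_le_left _ _)
    · rcases List.mem_cons.mp hy' with rfl | hy'' 
      · exact le_trans (ih (min h y) _ (.head _)) (min_le_right _ _)
      · exact ih (min h a) y (.tail _ hy'')

theorem pv_fold_g (rl : Int) : ∀ (l : List Int) (a : Int) (c : Option Int),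
    (l.foldl
      (fun (st : Int × Option Int) s =>
        match st with
        | (answer, none) => (answer + 1, some (s + rl))
        | (answer, some c) =>
            if c ≤ s then (answer + 1, some (s + rl)) else (answer, some c))
      (a, c)).1 = a + gLoop rl c l := by
  intro l
  induction l with
  | nil => intro a c; cases c <;> simp [gLoop]
  | cons s t ih =>
    intro a c
    cases c with
    | none => rw [List.foldl, ih]; simp [gLoop]; ring
    | some c =>
      by_cases hc : c ≤ s
      · rw [List.foldl]; simp only [hc, if_pos]; rw [ih]; simp [gLoop, hc]; ring
      · rw [List.foldl]; simp only [hc, if_neg, not_false_iff]; rw [ih]; simp [gLoop, hc]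

theorem pv_filter_g (rl c : Int) : ∀ (l : List Int), l.Pairwise (· ≤ ·) →
    gLoop rl (some c) l = gLoop rl none (l.filter (fun i => decide (c ≤ i))) := by
  intro l
  induction l with
  | nil => intro _; simp [gLoop]
  | cons s t ih =>
    intro hp
    rcases List.pairwise_cons.mp hp with ⟨hs, ht⟩
    by_cases hc : c ≤ s
    · have hkeep : t.filter (fun i => decide (c ≤ i)) = t := by
        apply List.filter_eq_self.mpr
        intro y hy
        exact decide_eq_true (le_trans hc (hs y hy))
      simp [gLoop, hc, List.filter, hkeep]
    · have h1 : gLoop rl (some c) (s :: t) = gLoop rl (some c) t := by simp [gLoop, hc]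
      rw [h1, ih ht]
      simp [List.filter, hc]

theorem pv_go_eq (rl : Int) : ∀ (n : Nat) (xs : List Int), xs.length ≤ n → ∀ (a : Int),
    solution_heap_go rl xs a = a + gLoop rl none (PySem.List.sorted xs (fun x => x) false) := by
  intro n
  induction n with
  | zero =>
    intro xs hlen a
    have hx : xs = [] := List.eq_nil_of_length_eq_zero (Nat.le_zero.mp hlen)
    subst hx
    rw [pv_go_nil, (PySem.List.sorted_eq_nil_iff ([] : List Int) (fun x => x) false).mpr rfl]
    simp [gLoop]
  | succ n ih =>
    intro xs hlen a
    match xs with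
    | [] =>
      rw [pv_go_nil, (PySem.List.sorted_eq_nil_iff ([] : List Int) (fun x => x) false).mpr rfl]
      simp [gLoop]
    | h :: t =>
      -- the sorted list is nonempty
      obtain ⟨s₀, ss, hsort⟩ : ∃ s₀ ss, PySem.List.sorted (h :: t) (fun x => x) false = s₀ :: ss := by
        rcases hs : PySem.List.sorted (h :: t) (fun x => x) false with _ | ⟨s₀, ss⟩
        · exact absurd ((PySem.List.sorted_eq_nil_iff (h :: t) (fun x => x) false).mp hs) (by simp)
        · exact ⟨s₀, ss, rfl⟩
      -- the popped minimum equals the head of the sorted list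
      have hperm : (PySem.List.sorted (h :: t) (fun x => x) false).Perm (h :: t) :=
        PySem.List.sorted_perm _ _ _
      have hs₀mem : s₀ ∈ h :: t := hperm.mem_iff.mp (by rw [hsort]; exact .head _)
      have hmem : t.foldl min h ∈ h :: t := pv_foldl_min_mem t h
      have hms : t.foldl min h = s₀ :=
        le_antisymm (pv_foldl_min_le t h s₀ hs₀mem)
          (PySem.List.key_head_sorted_le (h :: t) (fun x => x) hsort _ hmem)
      -- the surviving list is a permutation of the filtered sorted tail
      have herase : ((h :: t).erase s₀).Perm ss := by
        have e1 : ((h :: t).erase s₀).Perm ((PySem.List.sorted (h :: t) (fun x => x) false).erase s₀) :=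
          (hperm.erase s₀).symm
        rw [hsort] at e1
        simpa using e1
      have hrest : (((h :: t).erase s₀).filter (fun i => decide (s₀ + rl ≤ i))).Perm
          (ss.filter (fun i => decide (s₀ + rl ≤ i))) := herase.filter _
      -- the sorted tail is already ordered, hence so is its filtering
      have hpw : (s₀ :: ss).Pairwise (fun a b => a ≤ b) := by
        have hp := PySem.List.sorted_pairwise (h :: t) (fun x => x)
        rwa [hsort] at hp
      have hsspw : ss.Pairwise (fun a b => a ≤ b) := (List.pairwise_cons.mp hpw).2
      have hsorted_rest : PySem.List.sorted
          (((h :: t).erase s₀).filter (fun i => decide (s₀ + rl ≤ i))) (fun x => x) false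
          = ss.filter (fun i => decide (s₀ + rl ≤ i)) := by
        rw [PySem.List.sorted_eq_sorted_of_perm _ _ _ (fun x y hxy => hxy) hrest]
        exact PySem.List.sorted_eq_self_of_pairwise _ _ (hsspw.filter _)
      have hlen' : (((h :: t).erase s₀).filter (fun i => decide (s₀ + rl ≤ i))).length ≤ n := by
        have h1 := List.length_filter_le (fun i => decide (s₀ + rl ≤ i)) ((h :: t).erase s₀)
        have h2 := List.length_erase_of_mem (hms ▸ hmem)
        simp only [List.length_cons] at h2 hlen
        omega
      rw [pv_go_cons, hms, ih _ hlen', hsorted_rest, hsort]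
      have hf := pv_filter_g rl (s₀ + rl) ss hsspw
      simp [gLoop, ← hf]
      ring

-- ===== VERDICT (by name: the statement is the Claim_ definition above) =====
theorem solution_heap_spec : Claim_equal_solution_heap := by
  intro wl rl l _
  unfold Spec_solution_heap solution_heap solution_heap_alt
  rw [pv_fold_g, pv_go_eq rl l.length l (le_refl _) 0]
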